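-- pv_equiv track=rewrite | github.com/CryAndRRich/hustack | leetcode/array/3616_Number_of_Student_Replacements/codes/arr.py | totalReplacements
-- ===== SOURCE A (Python) =====
-- from typing import List
--
-- def totalReplacements(ranks: List[int]) -> int:
--     best = ranks[0]
--     cnt = 0
--     for r in ranks[1:]:
--         if r < best:
--             best = r
--             cnt += 1
--     return cnt
-- ===== SOURCE B (Python) =====
-- from itertools import accumulate
--
-- def totalReplacements(ranks):
--     prefix = list(accumulate(ranks, min))
--     return sum(1 for a, b in zip(prefix, prefix[1:]) if b < a)
-- ===== Notes on version B (the rewrite author's own statement) =====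
-- stated objective: alternative
-- what changed: Replaces the single best/cnt state loop by building the running-minimum table with itertools.accumulate and then counting strict decreases between adjacent entries in a second pass.
import Mathlib
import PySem

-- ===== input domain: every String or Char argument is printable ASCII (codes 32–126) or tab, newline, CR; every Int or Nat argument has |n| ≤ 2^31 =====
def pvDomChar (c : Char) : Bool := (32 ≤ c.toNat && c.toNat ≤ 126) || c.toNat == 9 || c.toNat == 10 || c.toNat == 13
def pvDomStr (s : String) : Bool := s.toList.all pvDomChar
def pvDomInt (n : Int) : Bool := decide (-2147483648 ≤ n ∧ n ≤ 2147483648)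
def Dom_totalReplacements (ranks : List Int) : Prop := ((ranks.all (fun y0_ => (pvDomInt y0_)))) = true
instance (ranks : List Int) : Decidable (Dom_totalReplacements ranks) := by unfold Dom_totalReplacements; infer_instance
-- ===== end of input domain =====

-- B builds the running-minimum table first and counts adjacent strict decreases in a second pass (alternative decomposition).


-- ===== PORT A =====
-- the loop body of A: if r < best: best = r; cnt += 1
def pvStep (st : Int × Int) (r : Int) : Int × Int := if r < st.1 then (r, st.2 + 1) else st

-- best = ranks[0]; cnt = 0; for r in ranks[1:]: …; return cnt
def totalReplacements (ranks : List Int) : Int :=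
  let best0 := (PySem.List.pyGet? ranks 0).getD 0  -- first element; none (IndexError) excluded by Pre_
  let st := (ranks.drop 1).foldl pvStep (best0, 0)
  st.2

-- ===== PORT B =====
-- itertools.accumulate(ranks, min): running minima
def pvAccumMinGo (acc : Int) : List Int → List Int
  | [] => [acc]
  | y :: ys => acc :: pvAccumMinGo (min acc y) ys

def pvAccumMin : List Int → List Int
  | [] => []
  | x :: xs => pvAccumMinGo x xs

-- sum(1 for a, b in zip(prefix, prefix[1:]) if b < a)
def pvCountDecr : List Int → Int
  | a :: b :: rest => (if b < a then 1 else 0) + pvCountDecr (b :: rest)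
  | _ => 0

def totalReplacements_alt (ranks : List Int) : Int :=
  pvCountDecr (pvAccumMin ranks)

-- ===== PRECONDITION & SPEC =====
-- Pre_ excludes only the empty list, on which A raises IndexError reading the first element.
def Pre_totalReplacements (ranks : List Int) : Prop := ranks ≠ []
instance (ranks : List Int) : Decidable (Pre_totalReplacements ranks) := by unfold Pre_totalReplacements; infer_instance
def pvWitness_totalReplacements : List Int := [3, 1, 2, 0]

def Spec_totalReplacements (ranks : List Int) (out : Int) : Prop := out = totalReplacements_alt ranks
instance (ranks : List Int) (out : Int) : Decidable (Spec_totalReplacements ranks out) := by unfold Spec_totalReplacements; infer_instance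

-- ===== CLAIM (what is proved, stated in full; the proofs are below) =====
def Claim_equal_totalReplacements : Prop := ∀ (ranks : List Int), Dom_totalReplacements ranks → Pre_totalReplacements ranks → Spec_totalReplacements ranks (totalReplacements ranks)

-- ===== LEMMAS AND PROOFS =====

theorem pvFoldl_snd_offset (l : List Int) (b c : Int) :
    (l.foldl pvStep (b, c)).2 = c + (l.foldl pvStep (b, 0)).2 := by
  induction l generalizing b c with
  | nil => simp
  | cons y ys ih =>
    simp only [List.foldl_cons, pvStep]
    split_ifs
    · rw [ih y (c + 1), ih y (0 + 1)]; omega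
    · exact ih b c

theorem pvCountDecr_accum (xs : List Int) (acc : Int) :
    pvCountDecr (pvAccumMinGo acc xs) = (xs.foldl pvStep (acc, 0)).2 := by
  induction xs generalizing acc with
  | nil => simp [pvAccumMinGo, pvCountDecr]
  | cons y ys ih =>
    have hhead : ∀ (a : Int) (l : List Int), ∃ t, pvAccumMinGo a l = a :: t := by
      intro a l; cases l <;> exact ⟨_, rfl⟩
    obtain ⟨t, ht⟩ := hhead (min acc y) ys
    simp only [pvAccumMinGo, ht, pvCountDecr, List.foldl_cons, pvStep]
    rw [← ht, ih]
    by_cases h : y < acc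
    · have : min acc y = y := by omega
      simp [this, h, pvFoldl_snd_offset ys y 1]
    · have : min acc y = acc := by omega
      simp [this, h]

-- ===== VERDICT (by name: the statement is the Claim_ definition above) =====
theorem totalReplacements_spec : Claim_equal_totalReplacements := by
  intro ranks _ hpre
  cases ranks with
  | nil => exact absurd rfl hpre
  | cons x xs =>
    show _ = _
    simp only [totalReplacements, totalReplacements_alt, pvAccumMin,
      PySem.List.pyGet?, List.drop_one, List.tail_cons]
    rw [pvCountDecr_accum]
    simp [PySem.List.pyIdx?]
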